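-- pv_equiv track=rewrite | github.com/jonglee823/algorithm | programmers/level2/n^2 배열 자르기.py | solution
-- ===== SOURCE A (Python) =====
-- def solution(n, left, right):
--     array_line = []
--
--     for i in range(left, right + 1):
--         row = i // n
--         col = i % n
--         max_value = max(row, col)
--         array_line.append(max_value + 1)
--
--     return array_line
-- ===== SOURCE B (Python) =====
-- def solution(n, left, right):
--     # Row-wise 2D traversal: no per-element floor division / modulo.
--     result = []
--     first = left // n
--     last = right // n
--     for r in range(first, last + 1):
--         c_start = left % n if r == first else 0
--         c_end = right % n if r == last else n - 1
--         for c in range(c_start, c_end + 1):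
--             result.append(max(r, c) + 1)
--     return result
-- ===== Notes on version B (the rewrite author's own statement) =====
-- stated objective: alternative
-- what changed: Replaced the flat index scan computing i//n and i%n for every element by a 2D row-wise traversal: rows run from left//n to right//n, each row emits max(row,col)+1 over its column range, so floor-division/modulo is done only at the row boundaries.
-- outside the precondition, e.g. on solution(-2, 0, 1): A returns [1, 0], B returns []; on solution(0, 0, 1): A raises ZeroDivisionError, B raises ZeroDivisionError
import Mathlib
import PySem

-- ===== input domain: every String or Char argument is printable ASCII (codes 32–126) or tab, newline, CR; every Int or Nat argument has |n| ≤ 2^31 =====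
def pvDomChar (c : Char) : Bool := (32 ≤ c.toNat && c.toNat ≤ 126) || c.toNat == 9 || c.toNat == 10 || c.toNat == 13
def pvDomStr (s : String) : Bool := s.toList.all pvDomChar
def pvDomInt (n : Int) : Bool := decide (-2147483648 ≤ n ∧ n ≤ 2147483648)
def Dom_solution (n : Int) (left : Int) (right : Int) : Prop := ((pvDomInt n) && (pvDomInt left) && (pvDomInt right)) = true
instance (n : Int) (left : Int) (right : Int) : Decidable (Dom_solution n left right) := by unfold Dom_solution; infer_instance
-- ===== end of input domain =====

-- B replaces the flat scan (i//n, i%n per element) by a row-wise 2D traversal; objective: alternative decomposition.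

-- ===== PORT A =====
def solution (n : Int) (left : Int) (right : Int) : List Int :=
  (PySem.List.pyRange left (right + 1) 1).foldl
    (fun array_line i =>
      let row := PySem.Int.floordiv i n
      let col := PySem.Int.mod i n
      let max_value := max row col
      array_line ++ [max_value + 1]) []

-- ===== PORT B =====
def solution_alt (n : Int) (left : Int) (right : Int) : List Int :=
  let first := PySem.Int.floordiv left n
  let last := PySem.Int.floordiv right n
  (PySem.List.pyRange first (last + 1) 1).foldl
    (fun result r =>
      let cStart := if r = first then PySem.Int.mod left n else 0
      let cEnd := if r = last then PySem.Int.mod right n else n - 1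
      (PySem.List.pyRange cStart (cEnd + 1) 1).foldl
        (fun res c => res ++ [max r c + 1]) result) []

-- ===== PRECONDITION & SPEC =====
-- Pre_ restricts to the puzzle's natural domain 1 ≤ n: for n = 0 A raises ZeroDivisionError
-- whenever left ≤ right, and for n < 0 A's values come from negative-divisor floor division,
-- outside the n×n-matrix meaning of the task.
def Pre_solution (n : Int) (left : Int) (right : Int) : Prop := 1 ≤ n
instance (n : Int) (left : Int) (right : Int) : Decidable (Pre_solution n left right) := by unfold Pre_solution; infer_instance
def pvWitness_solution : Int × Int × Int := (3, 2, 5)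
def Spec_solution (n : Int) (left : Int) (right : Int) (out : List Int) : Prop := out = solution_alt n left right
instance (n : Int) (left : Int) (right : Int) (out : List Int) : Decidable (Spec_solution n left right out) := by unfold Spec_solution; infer_instance

-- ===== CLAIM (what is proved, stated in full; the proofs are below) =====
def Claim_equal_solution : Prop := ∀ (n : Int) (left : Int) (right : Int), Dom_solution n left right → Pre_solution n left right → Spec_solution n left right (solution n left right)

-- ===== LEMMAS AND PROOFS =====

-- A as a map over the flat index range.
lemma solution_eq_map (n l r : Int) :
    solution n l r = (PySem.List.pyRange l (r + 1) 1).map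
      (fun i => max (PySem.Int.floordiv i n) (PySem.Int.mod i n) + 1) := by
  simp only [solution]
  rw [PySem.List.foldl_append_singleton_eq_map]
  simp

-- B as a flatMap over the rows.
lemma solution_alt_eq_flatMap (n l r : Int) :
    solution_alt n l r =
      (PySem.List.pyRange (PySem.Int.floordiv l n) (PySem.Int.floordiv r n + 1) 1).flatMap
        (fun row =>
          (PySem.List.pyRange
              (if row = PySem.Int.floordiv l n then PySem.Int.mod l n else 0)
              ((if row = PySem.Int.floordiv r n then PySem.Int.mod r n else n - 1) + 1) 1).map
            (fun c => max row c + 1)) := by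
  simp only [solution_alt, PySem.List.foldl_append_singleton_eq_map]
  rw [PySem.List.foldl_append_eq_flatMap]
  simp

lemma flatMap_congr_mem {α β : Type} (l : List α) (f g : α → List β)
    (h : ∀ x ∈ l, f x = g x) : l.flatMap f = l.flatMap g := by
  induction l with
  | nil => rfl
  | cons a t ih =>
      simp only [List.flatMap_cons]
      rw [h a (by simp), ih (fun x hx => h x (by simp [hx]))]

-- One row of the flat scan equals one column scan.
lemma row_block (n : Int) (hn : 0 < n) (row s e : Int) (hs : 0 ≤ s) (he : e ≤ n) :
    (PySem.List.pyRange (row * n + s) (row * n + e) 1).map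
      (fun i => max (PySem.Int.floordiv i n) (PySem.Int.mod i n) + 1)
    = (PySem.List.pyRange s e 1).map (fun c => max row c + 1) := by
  rw [PySem.List.pyRange_one, PySem.List.pyRange_one]
  have hd : row * n + e - (row * n + s) = e - s := by ring
  rw [hd, List.map_map, List.map_map]
  apply List.map_congr_left
  intro k hk
  simp only [List.mem_range] at hk
  have hke : s + (k : Int) < e := by omega
  have harg : row * n + s + (k : Int) = row * n + (s + k) := by ring
  have hfd : PySem.Int.floordiv (row * n + (s + (k : Int))) n = row := by
    rw [PySem.Int.floordiv_eq_iff_of_pos hn]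
    constructor
    · have : 0 ≤ s + (k : Int) := by omega
      linarith
    · have h1 : (row + 1) * n = row * n + n := by ring
      rw [h1]; linarith
  have hmd : PySem.Int.mod (row * n + (s + (k : Int))) n = s + (k : Int) := by
    have h2 := PySem.Int.floordiv_mul_add_mod (row * n + (s + (k : Int))) n
    rw [hfd] at h2
    linarith
  simp only [Function.comp]
  rw [harg, hfd, hmd]

lemma floordiv_mono_of_pos (n a b : Int) (hn : 0 < n) (hab : a ≤ b) :
    PySem.Int.floordiv a n ≤ PySem.Int.floordiv b n := by
  rw [PySem.Int.le_floordiv_iff_mul_le hn]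
  have := (PySem.Int.floordiv_eq_iff_of_pos (a := a) (b := n) hn).mp rfl
  linarith [this.1]

lemma floordiv_bounds (n a : Int) (hn : 0 < n) :
    PySem.Int.floordiv a n * n ≤ a ∧ a < (PySem.Int.floordiv a n + 1) * n :=
  (PySem.Int.floordiv_eq_iff_of_pos hn).mp rfl

lemma floordiv_mul_self (n q : Int) (hn : 0 < n) :
    PySem.Int.floordiv (q * n) n = q := by
  rw [PySem.Int.floordiv_eq_iff_of_pos hn]
  constructor
  · linarith
  · nlinarith

lemma mod_mul_self (n q : Int) (hn : 0 < n) :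
    PySem.Int.mod (q * n) n = 0 := by
  have h := PySem.Int.floordiv_mul_add_mod (q * n) n
  rw [floordiv_mul_self n q hn] at h
  linarith

-- Main induction on the number of rows.
lemma main_rows (n : Int) (hn : 0 < n) : ∀ (k : Nat) (l r : Int),
    (PySem.Int.floordiv r n - PySem.Int.floordiv l n).toNat = k →
    (PySem.List.pyRange l (r + 1) 1).map
      (fun i => max (PySem.Int.floordiv i n) (PySem.Int.mod i n) + 1)
    = solution_alt n l r := by
  intro k
  induction k with
  | zero =>
      intro l r hk
      rw [solution_alt_eq_flatMap]
      set fl := PySem.Int.floordiv l n with hfl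
      set fr := PySem.Int.floordiv r n with hfr
      have hle : fr ≤ fl := by omega
      by_cases heq : fr = fl
      · -- single row
        rw [heq, PySem.List.pyRange_one_singleton]
        simp only [List.flatMap_cons, List.flatMap_nil, List.append_nil, if_true]
        have hl := floordiv_bounds n l hn
        have hr := floordiv_bounds n r hn
        have hml : l = fl * n + PySem.Int.mod l n := by
          have := PySem.Int.floordiv_mul_add_mod l n; linarith
        have hmr : r + 1 = fl * n + (PySem.Int.mod r n + 1) := by
          have := PySem.Int.floordiv_mul_add_mod r n
          rw [← hfr] at this; rw [heq] at this; linarith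
        calc (PySem.List.pyRange l (r + 1) 1).map _
            = (PySem.List.pyRange (fl * n + PySem.Int.mod l n) (fl * n + (PySem.Int.mod r n + 1)) 1).map
                (fun i => max (PySem.Int.floordiv i n) (PySem.Int.mod i n) + 1) := by rw [← hml, ← hmr]
          _ = _ := by
              rw [row_block n hn fl (PySem.Int.mod l n) (PySem.Int.mod r n + 1)
                    (PySem.Int.mod_nonneg l hn) (by have := PySem.Int.mod_lt r hn; omega)]
      · -- empty: fr < fl, hence r < l
        have hlt : fr < fl := lt_of_le_of_ne hle heq
        have hrl : r < l := by
          by_contra h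
          have := floordiv_mono_of_pos n l r hn (by omega)
          omega
        rw [PySem.List.pyRange_one_eq_nil (by omega), PySem.List.pyRange_one_eq_nil (by omega)]
        simp
  | succ k ih =>
      intro l r hk
      set fl := PySem.Int.floordiv l n with hfl
      set fr := PySem.Int.floordiv r n with hfr
      have hlt : fl < fr := by omega
      set m := (fl + 1) * n with hm
      have hbl := floordiv_bounds n l hn
      have hbr := floordiv_bounds n r hn
      have hlm : l < m := by rw [hm]; exact hbl.2
      have hmr : m ≤ r := by
        have : fl + 1 ≤ fr := by omega
        have h2 := (PySem.Int.le_floordiv_iff_mul_le (q := fl + 1) (a := r) hn).mp (by omega)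
        linarith
      have hfm : PySem.Int.floordiv m n = fl + 1 := by rw [hm]; exact floordiv_mul_self n (fl + 1) hn
      have hmm : PySem.Int.mod m n = 0 := by rw [hm]; exact mod_mul_self n (fl + 1) hn
      -- split the flat range at m
      rw [PySem.List.pyRange_one_append l m (r + 1) (by omega) (by omega), List.map_append]
      -- first chunk is the first row
      have hml : l = fl * n + PySem.Int.mod l n := by
        have := PySem.Int.floordiv_mul_add_mod l n; linarith
      have hmn : m = fl * n + n := by rw [hm]; ring
      have hfirst : (PySem.List.pyRange l m 1).map
          (fun i => max (PySem.Int.floordiv i n) (PySem.Int.mod i n) + 1)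
          = (PySem.List.pyRange (PySem.Int.mod l n) n 1).map (fun c => max fl c + 1) := by
        calc (PySem.List.pyRange l m 1).map _
            = (PySem.List.pyRange (fl * n + PySem.Int.mod l n) (fl * n + n) 1).map
                (fun i => max (PySem.Int.floordiv i n) (PySem.Int.mod i n) + 1) := by rw [← hml, ← hmn]
          _ = _ := row_block n hn fl (PySem.Int.mod l n) n (PySem.Int.mod_nonneg l hn) le_rfl
      rw [hfirst, ih m r (by omega)]
      -- unfold both B-forms and compare row by row
      rw [solution_alt_eq_flatMap, solution_alt_eq_flatMap, hfm, ← hfl, ← hfr]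
      rw [PySem.List.pyRange_one_cons (a := fl) (b := fr + 1) (by omega)]
      simp only [List.flatMap_cons, if_true, if_neg (by omega : ¬ fl = fr)]
      have hn1 : n - 1 + 1 = n := by ring
      rw [hn1]
      congr 1
      apply flatMap_congr_mem
      intro row hrow
      have hmem := (PySem.List.mem_pyRange_one).mp hrow
      have hne : ¬ row = fl := by omega
      rw [if_neg hne]
      by_cases h1 : row = fl + 1
      · rw [if_pos h1, hmm]
      · rw [if_neg h1]

-- ===== VERDICT (by name: the statement is the Claim_ definition above) =====
theorem solution_spec : Claim_equal_solution := by
  intro n l r _ hpre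
  unfold Spec_solution
  rw [solution_eq_map]
  exact main_rows n (by exact hpre) _ l r rfl
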